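-- pv_equiv track=rewrite | github.com/lautaroboninom/sistema_de_ventas_las_chulas | api/service/management/commands/repair_sequences.py | _safe_ident
-- ===== SOURCE A (Python) =====
-- ALLOWED_CHARS = set("abcdefghijklmnopqrstuvwxyz0123456789_ .")
--
-- def _safe_ident(s: str) -> str | None:
--     s = (s or "").strip()
--     if not s:
--         return None
--     low = s.lower()
--     if any(ch not in ALLOWED_CHARS for ch in low):
--         return None
--     # normalize: collapse spaces
--     return " ".join(low.split())
-- ===== SOURCE B (Python) =====
-- ALLOWED_CHARS = set("abcdefghijklmnopqrstuvwxyz0123456789_ .")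
--
-- def _safe_ident(s):
--     low = (s or "").strip().lower()
--     if not low:
--         return None
--     out = []
--     for ch in low:
--         if ch not in ALLOWED_CHARS:
--             return None
--         if ch == " ":
--             if out and out[-1] != " ":
--                 out.append(" ")
--         else:
--             out.append(ch)
--     return "".join(out)
-- ===== Notes on version B (the rewrite author's own statement) =====
-- stated objective: alternative
-- what changed: Replaces A's three separate passes (an any() validation scan, then split(), then a space-join) with a single left-to-right traversal that validates each character and collapses space runs in place using the last-appended character.
import Mathlib
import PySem

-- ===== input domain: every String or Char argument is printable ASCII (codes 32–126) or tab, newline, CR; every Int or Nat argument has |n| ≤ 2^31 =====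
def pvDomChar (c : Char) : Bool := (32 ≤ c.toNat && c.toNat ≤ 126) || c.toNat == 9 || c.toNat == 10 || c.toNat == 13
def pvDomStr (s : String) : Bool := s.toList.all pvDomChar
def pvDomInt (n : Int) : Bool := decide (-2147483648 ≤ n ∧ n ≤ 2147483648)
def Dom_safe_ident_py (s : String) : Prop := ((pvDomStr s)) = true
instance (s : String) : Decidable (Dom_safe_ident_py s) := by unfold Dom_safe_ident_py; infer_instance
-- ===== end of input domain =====

-- B fuses A's three passes (any-validation, split(), ' '.join()) into one scan that
-- validates each char and collapses space runs in place; alternative decomposition, same cost.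

-- ===== PORT A =====
-- ALLOWED_CHARS = set("abcdefghijklmnopqrstuvwxyz0123456789_ .")  (module-level constant, shared)
def allowedChars : PySem.Set Char :=
  PySem.Set.ofList "abcdefghijklmnopqrstuvwxyz0123456789_ .".toList

def safe_ident_py (s : String) : Option String :=
  -- s = (s or "").strip()
  let s1 := PySem.Str.strip (if PySem.Str.len s == 0 then "" else s)
  -- if not s: return None
  if PySem.Str.len s1 == 0 then none
  else
    -- low = s.lower()
    let low := PySem.Str.lower s1
    -- if any(ch not in ALLOWED_CHARS for ch in low): return None
    if low.toList.any (fun ch => !(PySem.Set.contains allowedChars ch)) then none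
    -- return " ".join(low.split())
    else some (PySem.Str.join " " (PySem.Str.split₀ low))

-- ===== PORT B =====
-- the for-loop of Source B: out is the accumulated result list, returns None on a bad char
def safeIdentGo : List Char → List Char → Option (List Char)
  | [], out => some out
  | c :: rest, out =>
    if !(PySem.Set.contains allowedChars c) then none          -- if ch not in ALLOWED_CHARS: return None
    else if c = ' ' then                                       -- if ch == " ":
      if out ≠ [] ∧ out.getLast? ≠ some ' ' then               --   if out and out[-1] != " ":
        safeIdentGo rest (out ++ [' '])                        --     out.append(" ")
      else safeIdentGo rest out
    else safeIdentGo rest (out ++ [c])                         -- else: out.append(ch)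

def safe_ident_py_alt (s : String) : Option String :=
  -- low = (s or "").strip().lower()
  let low := (PySem.Str.lower (PySem.Str.strip (if PySem.Str.len s == 0 then "" else s))).toList
  -- if not low: return None
  if low.isEmpty then none
  -- loop, then "".join(out)
  else (safeIdentGo low []).map String.ofList

-- ===== PRECONDITION & SPEC =====
def Spec_safe_ident_py (s : String) (out : Option String) : Prop := out = safe_ident_py_alt s
instance (s : String) (out : Option String) : Decidable (Spec_safe_ident_py s out) := by unfold Spec_safe_ident_py; infer_instance

-- ===== CLAIM (what is proved, stated in full; the proofs are below) =====
def Claim_equal_safe_ident_py : Prop := ∀ (s : String), Dom_safe_ident_py s → Spec_safe_ident_py s (safe_ident_py s)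

-- ===== LEMMAS AND PROOFS =====

-- B's loop returns none as soon as some char of the remaining input is not allowed
theorem goNone (t : List Char) : ∀ (out : List Char),
    (∃ c ∈ t, PySem.Set.contains allowedChars c = false) → safeIdentGo t out = none := by
  induction t with
  | nil => rintro out ⟨c, hc, _⟩; simp at hc
  | cons c rest ih =>
    rintro out ⟨d, hd, hdbad⟩
    rw [safeIdentGo]
    by_cases hc : PySem.Set.contains allowedChars c = false
    · rw [hc]; rfl
    · have hc' : PySem.Set.contains allowedChars c = true := by
        cases h : PySem.Set.contains allowedChars c
        · exact absurd h hc
        · rfl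
      have hd'' : d ∈ rest := by
        rcases List.mem_cons.mp hd with rfl | h
        · exact absurd hdbad hc
        · exact h
      rw [hc']
      rw [if_neg (by simp)]
      split
      · split <;> exact ih _ ⟨d, hd'', hdbad⟩
      · exact ih _ ⟨d, hd'', hdbad⟩

-- every allowed char is whitespace iff it is the literal space
theorem allowed_isspace (c : Char) (h : PySem.Set.contains allowedChars c = true) :
    PySem.Chars.isspace c = decide (c = ' ') := by
  have hmem : c ∈ "abcdefghijklmnopqrstuvwxyz0123456789_ .".toList := by
    have h2 : c ∈ PySem.Set.ofList "abcdefghijklmnopqrstuvwxyz0123456789_ .".toList := by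
      have h3 := h
      rw [allowedChars] at h3
      simpa [PySem.Set.contains] using h3
    exact (PySem.Set.mem_ofList _ _).mp h2
  have hall : ("abcdefghijklmnopqrstuvwxyz0123456789_ .".toList.all
      (fun c => PySem.Chars.isspace c == decide (c = ' '))) = true := by decide
  simpa using List.all_eq_true.mp hall c hmem

-- join over a snoc of word lists
theorem join_snoc (xs : List (List Char)) (y : List Char) :
    PySem.Chars.join [' '] (xs ++ [y]) =
      PySem.Chars.join [' '] xs ++ (if xs = [] then [] else [' ']) ++ y := by
  induction xs with
  | nil => simp [PySem.Chars.join_singleton, PySem.Chars.join_nil]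
  | cons x xs ih =>
    cases xs with
    | nil =>
      rw [show ([x] ++ [y] : List (List Char)) = [x, y] from rfl, PySem.Chars.join_cons_cons,
        PySem.Chars.join_singleton, PySem.Chars.join_singleton, if_neg (by simp)]
    | cons x' xs' =>
      rw [List.cons_append] at ih
      calc PySem.Chars.join [' '] ((x :: x' :: xs') ++ [y])
          = PySem.Chars.join [' '] (x :: x' :: (xs' ++ [y])) := by simp
        _ = x ++ [' '] ++ PySem.Chars.join [' '] (x' :: (xs' ++ [y])) :=
            PySem.Chars.join_cons_cons ..
        _ = x ++ [' '] ++ ((PySem.Chars.join [' '] (x' :: xs') ++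
              if (x' :: xs') = [] then [] else [' ']) ++ y) := by rw [ih]
        _ = (PySem.Chars.join [' '] (x :: x' :: xs') ++
              if (x :: x' :: xs') = [] then [] else [' ']) ++ y := by
            rw [PySem.Chars.join_cons_cons, if_neg (by simp), if_neg (by simp)]
            simp [List.append_assoc]

-- heads of dropWhile fail the predicate
theorem head?_dropWhile {p : Char → Bool} (l : List Char) (c : Char)
    (h : (l.dropWhile p).head? = some c) : p c = false := by
  induction l with
  | nil => simp at h
  | cons a l ih =>
    by_cases ha : p a
    · exact ih (by simpa [List.dropWhile, ha] using h)
    · simp [List.dropWhile, ha] at h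
      subst h
      simpa using ha

-- the last char of a stripped char list is not whitespace
theorem strip_last (l : List Char) (c : Char)
    (h : (PySem.Chars.strip l).getLast? = some c) : PySem.Chars.isspace c = false := by
  unfold PySem.Chars.strip PySem.Chars.rstrip at h
  rw [List.getLast?_reverse] at h
  exact head?_dropWhile _ _ h

-- lowering a char preserves whitespace-ness
theorem isspace_lowerChar (c : Char) :
    PySem.Chars.isspace (PySem.Chars.lowerChar c) = PySem.Chars.isspace c := by
  unfold PySem.Chars.lowerChar
  split
  · next h =>
    have hn : 65 ≤ c.toNat ∧ c.toNat ≤ 90 := by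
      simpa [PySem.Chars.isupper, Char.le_def] using h
    have hv : (c.toNat + 32).isValidChar := by
      left; omega
    have he : (Char.ofNat (c.toNat + 32)).toNat = c.toNat + 32 := by
      rw [Char.ofNat, dif_pos hv]
      simp only [Char.ofNatAux, Char.toNat, UInt32.toNat, BitVec.toNat_ofNatLT]
    unfold PySem.Chars.isspace
    rw [he, Bool.eq_iff_iff]
    simp only [Bool.or_eq_true, Bool.and_eq_true, decide_eq_true_eq]
    omega
  · rfl

-- MAIN: B's single-pass accumulator simulates split₀.go's state (cur, acc)
theorem go_sim (t : List Char) : ∀ (cur : List Char) (acc : List (List Char)),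
    (∀ c ∈ t, PySem.Set.contains allowedChars c = true) →
    (∀ c ∈ cur, PySem.Chars.isspace c = false) →
    (∀ c, t.getLast? = some c → PySem.Chars.isspace c = false) →
    (t = [] → cur ≠ [] ∨ acc = []) →
    safeIdentGo t
        (PySem.Chars.join [' '] acc.reverse ++ (if acc = [] then [] else [' ']) ++ cur.reverse)
      = some (PySem.Chars.join [' '] (PySem.Chars.split₀.go t cur acc)) := by
  induction t with
  | nil =>
    intro cur acc _ _ _ h4
    rw [safeIdentGo, PySem.Chars.split₀.go]
    cases cur with
    | nil =>
      rcases h4 rfl with h | h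
      · exact absurd rfl h
      · subst h
        simp [PySem.Chars.join_nil]
    | cons c0 cur' =>
      simp only [List.isEmpty_cons, Bool.false_eq_true, if_false, List.reverse_cons]
      rw [join_snoc]
      simp [List.reverse_eq_nil_iff]
  | cons c rest ih =>
    intro cur acc h1 h2 h3 _
    have h1c : PySem.Set.contains allowedChars c = true := h1 c (List.mem_cons_self ..)
    have h1r : ∀ x ∈ rest, PySem.Set.contains allowedChars x = true :=
      fun x hx => h1 x (List.mem_cons_of_mem _ hx)
    have h3r : ∀ x, rest.getLast? = some x → PySem.Chars.isspace x = false := by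
      intro x hx
      apply h3
      cases rest with
      | nil => simp at hx
      | cons r rs => rw [List.getLast?_cons_cons]; exact hx
    rw [safeIdentGo, PySem.Chars.split₀.go, h1c]
    rw [if_neg (by simp)]
    by_cases hsp : c = ' '
    · subst hsp
      have hrest : rest ≠ [] := by
        intro hnil
        subst hnil
        have := h3 ' ' rfl
        simp [show PySem.Chars.isspace ' ' = true from rfl] at this
      rw [if_pos rfl, if_pos (show PySem.Chars.isspace ' ' = true from rfl)]
      cases cur with
      | nil =>
        simp only [List.isEmpty_nil, List.reverse_nil, List.append_nil, if_true]
        by_cases hacc : acc = []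
        · subst hacc
          simp only [List.reverse_nil, reduceIte, List.append_nil]
          rw [if_neg (by simp [PySem.Chars.join_nil])]
          have := ih [] [] h1r (by simp) h3r (fun h => absurd h hrest)
          simpa [PySem.Chars.join_nil] using this
        · rw [if_neg hacc]
          rw [if_neg (by
            rintro ⟨-, hlast⟩
            exact hlast List.getLast?_concat)]
          have := ih [] acc h1r (by simp) h3r (fun h => absurd h hrest)
          rw [if_neg hacc, List.reverse_nil, List.append_nil] at this
          exact this
      | cons c0 cur' =>
        have hc0 : PySem.Chars.isspace c0 = false := h2 c0 (List.mem_cons_self ..)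
        have hc0' : c0 ≠ ' ' := by
          intro h; rw [h] at hc0
          simp [show PySem.Chars.isspace ' ' = true from rfl] at hc0
        simp only [List.isEmpty_cons, Bool.false_eq_true, if_false]
        rw [if_pos (by
          rw [List.reverse_cons, ← List.append_assoc]
          constructor
          · simp
          · rw [List.getLast?_concat]
            simp [hc0'])]
        have := ih [] ((c0 :: cur').reverse :: acc) h1r (by simp) h3r
          (fun h => absurd h hrest)
        rw [List.reverse_nil, List.append_nil, if_neg (by simp)] at this
        rw [← this]
        congr 1
        conv_rhs => rw [List.reverse_cons, join_snoc]
        simp [List.append_assoc, List.reverse_eq_nil_iff]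
    · have hspace : PySem.Chars.isspace c = false := by
        rw [allowed_isspace c h1c]
        simp [hsp]
      rw [if_neg hsp,
        if_neg (show ¬(PySem.Chars.isspace c = true) from by simp [hspace])]
      have := ih (c :: cur) acc h1r
        (by
          intro x hx
          rcases List.mem_cons.mp hx with rfl | hx'
          · exact hspace
          · exact h2 x hx')
        h3r (by simp)
      rw [← this]
      congr 1
      conv_rhs => rw [List.reverse_cons, ← List.append_assoc]

-- ===== VERDICT (by name: the statement is the Claim_ definition above) =====
theorem safe_ident_py_spec : Claim_equal_safe_ident_py := by
  intro s _
  show safe_ident_py s = safe_ident_py_alt s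
  unfold safe_ident_py safe_ident_py_alt
  have htl : (PySem.Str.lower (PySem.Str.strip (if PySem.Str.len s == 0 then "" else s))).toList
      = PySem.Chars.lower (PySem.Chars.strip (if PySem.Str.len s == 0 then "" else s).toList) := by
    rw [PySem.Str.toList_lower, PySem.Str.toList_strip]
  set s0 : String := (if PySem.Str.len s == 0 then "" else s) with hs0
  show (if (PySem.Str.len (PySem.Str.strip s0) == 0) = true then none
      else if ((PySem.Str.lower (PySem.Str.strip s0)).toList.any
          fun ch => !(PySem.Set.contains allowedChars ch)) = true then none
      else some (PySem.Str.join " " (PySem.Str.split₀ (PySem.Str.lower (PySem.Str.strip s0)))))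
    = (if (PySem.Str.lower (PySem.Str.strip s0)).toList.isEmpty = true then none
      else Option.map String.ofList (safeIdentGo (PySem.Str.lower (PySem.Str.strip s0)).toList []))
  have hlen : (PySem.Str.len (PySem.Str.strip s0) == 0)
      = (PySem.Str.lower (PySem.Str.strip s0)).toList.isEmpty := by
    rw [htl, PySem.Str.len, PySem.Str.toList_strip]
    unfold PySem.Chars.lower
    rw [Bool.eq_iff_iff, beq_iff_eq, List.isEmpty_iff]
    simp [List.length_eq_zero_iff, List.map_eq_nil_iff]
  by_cases hE : (PySem.Str.lower (PySem.Str.strip s0)).toList.isEmpty = true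
  · rw [hlen, hE]
    simp
  · have hE' : (PySem.Str.lower (PySem.Str.strip s0)).toList.isEmpty = false := by
      simpa using hE
    rw [hlen, hE', if_neg (show ¬(false = true) from by simp),
      if_neg (show ¬(false = true) from by simp)]
    by_cases hA : ((PySem.Str.lower (PySem.Str.strip s0)).toList.any
        (fun ch => !(PySem.Set.contains allowedChars ch))) = true
    · rw [if_pos hA]
      rcases List.any_eq_true.mp hA with ⟨d, hd, hbad⟩
      have hbad' : PySem.Set.contains allowedChars d = false := by
        cases h : PySem.Set.contains allowedChars d
        · rfl
        · rw [h] at hbad; simp at hbad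
      rw [goNone _ _ ⟨d, hd, hbad'⟩]
      rfl
    · rw [if_neg hA]
      have h1 : ∀ c ∈ (PySem.Str.lower (PySem.Str.strip s0)).toList,
          PySem.Set.contains allowedChars c = true := by
        intro c hc
        cases h : PySem.Set.contains allowedChars c
        · exact absurd (List.any_eq_true.mpr ⟨c, hc, by rw [h]; rfl⟩) hA
        · rfl
      have h3 : ∀ c, (PySem.Str.lower (PySem.Str.strip s0)).toList.getLast? = some c →
          PySem.Chars.isspace c = false := by
        intro c hc
        rw [htl] at hc
        unfold PySem.Chars.lower at hc
        rw [List.getLast?_map] at hc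
        cases h : (PySem.Chars.strip s0.toList).getLast? with
        | none => rw [h] at hc; simp at hc
        | some c0 =>
          rw [h] at hc
          simp only [Option.map_some, Option.some.injEq] at hc
          rw [← hc, isspace_lowerChar]
          exact strip_last _ _ h
      have hmain := go_sim (PySem.Str.lower (PySem.Str.strip s0)).toList [] [] h1 (by simp)
        h3 (by intro h; rw [h] at hE'; simp at hE')
      simp only [List.reverse_nil, List.append_nil,
        PySem.Chars.join_nil, reduceIte] at hmain
      have hval : PySem.Str.join " " (PySem.Str.split₀ (PySem.Str.lower (PySem.Str.strip s0)))
          = String.ofList (PySem.Chars.join [' ']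
              (PySem.Chars.split₀.go (PySem.Str.lower (PySem.Str.strip s0)).toList [] [])) := by
        rw [PySem.Str.join, show (" " : String).toList = [' '] from rfl,
          PySem.Str.split₀_map_toList, PySem.Chars.split₀]
      rw [hmain, Option.map_some, hval]
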